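-- pv_equiv track=rewrite | github.com/aabusheikh/University_old | Prog paradigms (2nd-3rd year)/Python/cubeLess.py | showAllRestSum
-- ===== SOURCE A (Python) =====
-- def cubeLess(x, b):
--     return b-(x*x*x)
--
-- def smallerCube(b):
--     results = []
--     for i in range(1,b):
--         r = cubeLess(i, b)
--         if r>0:
--             results.append((i, r))
--         else:
--             break
--     return results
--
-- def restSum(s):
--     result = 0
--     for (n, r) in s:
--         result += r
--     return result
--
-- def showAllRestSum(l, h):
--     results = []
--     while l<h:
--         rs = restSum(smallerCube(l))
--         if rs % 3 == 0:
--             results.append((l, rs))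
--         l += 1
--     return results
-- ===== SOURCE B (Python) =====
-- def showAllRestSum(l, h):
--     results = []
--     k = 0  # largest k with k**3 < l (0 when none); only grows as l grows
--     while l < h:
--         while (k + 1) ** 3 < l:
--             k += 1
--         rs = k * l - (k * (k + 1) // 2) ** 2
--         if rs % 3 == 0:
--             results.append((l, rs))
--         l += 1
--     return results
-- ===== Notes on version B (the rewrite author's own statement) =====
-- stated objective: alternative
-- what changed: The per-l inner pass that builds the list of cube residuals and sums it is replaced by the closed form k*l - (k*(k+1)//2)**2, with k (the largest integer whose cube is below l) maintained incrementally across the single outer pass.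
import Mathlib
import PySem

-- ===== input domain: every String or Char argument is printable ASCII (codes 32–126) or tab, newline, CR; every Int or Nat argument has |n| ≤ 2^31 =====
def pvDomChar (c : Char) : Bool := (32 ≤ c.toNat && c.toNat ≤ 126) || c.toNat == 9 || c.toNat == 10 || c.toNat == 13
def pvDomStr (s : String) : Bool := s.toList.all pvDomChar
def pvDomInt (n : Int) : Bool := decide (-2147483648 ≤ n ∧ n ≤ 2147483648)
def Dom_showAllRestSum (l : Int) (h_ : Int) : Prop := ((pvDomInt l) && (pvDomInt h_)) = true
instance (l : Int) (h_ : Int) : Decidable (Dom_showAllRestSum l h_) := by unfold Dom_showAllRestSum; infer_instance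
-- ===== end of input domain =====

-- B replaces A's per-l residual-list building and summing by the closed form
-- k*l - (k*(k+1)//2)^2 with k the largest integer whose cube is below l, kept incrementally.

-- ===== PORT A =====
def cubeLess (x b : Int) : Int := b - x * x * x

-- for i in range(1, b): append (i, r) while r > 0, else break
def scLoop (b : Int) : List Int → List (Int × Int)
  | [] => []
  | i :: rest =>
      let r := cubeLess i b
      if r > 0 then (i, r) :: scLoop b rest else []

def smallerCube (b : Int) : List (Int × Int) := scLoop b (PySem.List.pyRange 1 b 1)

def restSum (s : List (Int × Int)) : Int := s.foldl (fun acc p => acc + p.2) 0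

-- while l < h: …, l += 1 — fuel = number of remaining iterations (h - l)
def sarsLoopA : Nat → Int → Int → List (Int × Int) → List (Int × Int)
  | 0, _, _, results => results
  | fuel + 1, l, h_, results =>
      let rs := restSum (smallerCube l)
      sarsLoopA fuel (l + 1) h_ (if PySem.Int.mod rs 3 = 0 then results ++ [(l, rs)] else results)

def showAllRestSum (l : Int) (h_ : Int) : List (Int × Int) := sarsLoopA (h_ - l).toNat l h_ []

-- ===== PORT B =====
-- while (k+1)**3 < l: k += 1 — fuel (l - k) suffices since (k+1)**3 < l forces k + 1 < l for k ≥ 0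
def bumpB : Nat → Int → Int → Int
  | 0, _, k => k
  | fuel + 1, l, k => if (k + 1) ^ 3 < l then bumpB fuel l (k + 1) else k

def sarsLoopB : Nat → Int → Int → Int → List (Int × Int) → List (Int × Int)
  | 0, _, _, _, results => results
  | fuel + 1, l, h_, k, results =>
      let k' := bumpB (l - k).toNat l k
      let rs := k' * l - (PySem.Int.floordiv (k' * (k' + 1)) 2) ^ 2
      sarsLoopB fuel (l + 1) h_ k' (if PySem.Int.mod rs 3 = 0 then results ++ [(l, rs)] else results)

def showAllRestSum_alt (l : Int) (h_ : Int) : List (Int × Int) := sarsLoopB (h_ - l).toNat l h_ 0 []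

-- ===== PRECONDITION & SPEC =====
def Spec_showAllRestSum (l : Int) (h_ : Int) (out : List (Int × Int)) : Prop := out = showAllRestSum_alt l h_
instance (l : Int) (h_ : Int) (out : List (Int × Int)) : Decidable (Spec_showAllRestSum l h_ out) := by unfold Spec_showAllRestSum; infer_instance

-- ===== CLAIM (what is proved, stated in full; the proofs are below) =====
def Claim_equal_showAllRestSum : Prop := ∀ (l : Int) (h_ : Int), Dom_showAllRestSum l h_ → Spec_showAllRestSum l h_ (showAllRestSum l h_)

-- ===== LEMMAS AND PROOFS =====

lemma pv_cube_lower (k : Int) (hk : 0 ≤ k) : k + 1 ≤ (k + 1) ^ 3 := by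
  have e : (k + 1) ^ 3 = (k + 1) + (k * (k + 1)) * (k + 2) := by ring
  have p : 0 ≤ (k * (k + 1)) * (k + 2) :=
    mul_nonneg (mul_nonneg hk (by omega)) (by omega)
  linarith

lemma pv_cube_ge_self (i : Int) (hi : 1 ≤ i) : i ≤ i * i * i := by
  have e : i * i * i = i + (i * (i - 1)) * (i + 1) := by ring
  have p : 0 ≤ (i * (i - 1)) * (i + 1) :=
    mul_nonneg (mul_nonneg (by omega) (by omega)) (by omega)
  linarith

-- sum of the first n cubes
def cubeSum : Nat → Int
  | 0 => 0
  | n + 1 => cubeSum n + ((n : Int) + 1) ^ 3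

lemma cubeSum_formula (n : Nat) : cubeSum n = ((n * (n + 1) / 2 : Nat) : Int) ^ 2 := by
  induction n with
  | zero => simp [cubeSum]
  | succ n ih =>
      have hdiv : (n + 1) * (n + 2) / 2 = n * (n + 1) / 2 + (n + 1) := by
        have e : (n + 1) * (n + 2) = n * (n + 1) + (n + 1) * 2 := by ring
        rw [e, Nat.add_mul_div_right _ _ (by norm_num)]
      have h2 : n * (n + 1) / 2 * 2 = n * (n + 1) := Nat.div_mul_cancel (Nat.even_mul_succ_self n).two_dvd
      have h2' : ((n * (n + 1) / 2 : Nat) : Int) * 2 = (n : Int) * ((n : Int) + 1) := by exact_mod_cast h2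
      rw [cubeSum, ih, hdiv]
      push_cast
      nlinarith [h2']

-- A's inner pass, as a fuel recursion on the index
def sumFrom : Nat → Int → Int → Int
  | 0, _, _ => 0
  | n + 1, b, i => if i * i * i < b ∧ 1 ≤ i then (b - i * i * i) + sumFrom n b (i + 1) else 0

lemma restSum_eq_sum (s : List (Int × Int)) (a : Int) :
    s.foldl (fun acc p => acc + p.2) a = a + (s.map Prod.snd).sum := by
  induction s generalizing a with
  | nil => simp
  | cons x xs ih =>
      simp only [List.foldl, List.map_cons, List.sum_cons]
      rw [ih]; ring

lemma scLoop_sum (b : Int) : ∀ (n : Nat) (i : Int), (b - i).toNat ≤ n → 1 ≤ i →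
    ((scLoop b (PySem.List.pyRange i b 1)).map Prod.snd).sum = sumFrom n b i := by
  intro n
  induction n with
  | zero =>
      intro i hn hi
      rw [PySem.List.pyRange_one_eq_nil (by omega)]
      simp [scLoop, sumFrom]
  | succ m ih =>
      intro i hn hi
      by_cases hib : i < b
      · rw [PySem.List.pyRange_one_cons hib]
        simp only [scLoop, cubeLess, sumFrom]
        by_cases hc : i * i * i < b
        · rw [if_pos (show b - i * i * i > 0 by omega)]
          simp only [List.map_cons, List.sum_cons]
          rw [ih (i + 1) (by omega) (by omega), if_pos ⟨hc, hi⟩]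
        · have hnc : ¬ (i * i * i < b ∧ 1 ≤ i) := fun hx => hc hx.1
          rw [if_neg (show ¬ b - i * i * i > 0 by omega), if_neg hnc]
          simp
      · rw [PySem.List.pyRange_one_eq_nil (by omega)]
        have hnc : ¬ (i * i * i < b ∧ 1 ≤ i) := fun hx => by
          have h1 := pv_cube_ge_self i hi
          have h2 := hx.1
          omega
        simp only [scLoop, sumFrom]
        rw [if_neg hnc]
        simp

lemma sumFrom_fuel (b : Int) (m n : Nat) (i : Int) (hm : (b - i).toNat ≤ m)
    (hn : (b - i).toNat ≤ n) (hi : 1 ≤ i) : sumFrom m b i = sumFrom n b i := by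
  rw [← scLoop_sum b m i hm hi, ← scLoop_sum b n i hn hi]

lemma bumpB_nonneg : ∀ (n : Nat) (l k : Int), 0 ≤ k → 0 ≤ bumpB n l k := by
  intro n
  induction n with
  | zero => intro l k hk; exact hk
  | succ m ih =>
      intro l k hk
      rw [bumpB]
      split
      · exact ih l (k + 1) (by omega)
      · exact hk

lemma bumpB_inv : ∀ (n : Nat) (l k : Int), (k = 0 ∨ k ^ 3 < l) →
    (bumpB n l k = 0 ∨ (bumpB n l k) ^ 3 < l) := by
  intro n
  induction n with
  | zero => intro l k h; exact h
  | succ m ih =>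
      intro l k h
      rw [bumpB]
      split
      · exact ih l (k + 1) (Or.inr (by assumption))
      · exact h

-- key: telescoping the bump loop against sumFrom (the SAME fuel n drives both)
lemma bump_key (l : Int) : ∀ (n : Nat) (k : Int), 0 ≤ k →
    k * l - cubeSum k.toNat + sumFrom n l (k + 1)
      = bumpB n l k * l - cubeSum (bumpB n l k).toNat := by
  intro n
  induction n with
  | zero => intro k _; simp only [bumpB, sumFrom]; ring
  | succ m ih =>
      intro k hk
      simp only [bumpB, sumFrom]
      by_cases hcond : (k + 1) ^ 3 < l
      · rw [if_pos hcond,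
          if_pos (show (k + 1) * (k + 1) * (k + 1) < l ∧ 1 ≤ k + 1 from ⟨by nlinarith, by omega⟩)]
        have hT : cubeSum (k + 1).toNat = cubeSum k.toNat + (k + 1) ^ 3 := by
          have h1 : (k + 1).toNat = k.toNat + 1 := by omega
          rw [h1, cubeSum]
          have h3 : ((k.toNat : Int) + 1) = k + 1 := by omega
          rw [h3]
        have ihk := ih (k + 1) (by omega)
        rw [hT] at ihk
        rw [← ihk]; ring
      · have hnc : ¬ ((k + 1) * (k + 1) * (k + 1) < l ∧ 1 ≤ k + 1) :=
          fun hx => hcond (by nlinarith [hx.1])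
        rw [if_neg hcond, if_neg hnc]
        ring

-- prefix identity: sumFrom from 1 splits at any valid k (tail fuel pinned to (l - (k+1)).toNat)
lemma sumFrom_prefix (l : Int) : ∀ (n : Nat) (k : Int), k = (n : Int) → (k = 0 ∨ k ^ 3 < l) →
    sumFrom (l - 1).toNat l 1 = k * l - cubeSum k.toNat + sumFrom (l - (k + 1)).toNat l (k + 1) := by
  intro n
  induction n with
  | zero =>
      intro k hk _
      have hk0 : k = 0 := by exact_mod_cast hk
      subst hk0
      norm_num [cubeSum]
  | succ m ih =>
      intro k hk hinv
      have hkpos : 1 ≤ k := by omega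
      have hcube : k ^ 3 < l := hinv.resolve_left (by omega)
      have hkl : k < l := by
        have h1 := pv_cube_lower (k - 1) (by omega)
        have h2 : k - 1 + 1 = k := by ring
        rw [h2] at h1
        linarith
      have hprev : sumFrom (l - 1).toNat l 1
          = (k - 1) * l - cubeSum (k - 1).toNat + sumFrom (l - k).toNat l k := by
        have hi := ih (k - 1) (by omega) (by
          rcases Nat.eq_zero_or_pos m with hm | hm
          · left; omega
          · right
            have hk2 : 2 ≤ k := by omega
            have e : k ^ 3 = (k - 1) ^ 3 + 3 * (k * (k - 1)) + 1 := by ring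
            have p : 0 ≤ k * (k - 1) := mul_nonneg (by omega) (by omega)
            linarith)
        have he : k - 1 + 1 = k := by ring
        rw [he] at hi
        exact hi
      have hfu : (l - k).toNat = (l - (k + 1)).toNat + 1 := by omega
      have hstep : sumFrom (l - k).toNat l k
          = (l - k * k * k) + sumFrom (l - (k + 1)).toNat l (k + 1) := by
        rw [hfu]
        simp only [sumFrom]
        rw [if_pos ⟨by nlinarith, hkpos⟩]
      have hT : cubeSum k.toNat = cubeSum (k - 1).toNat + k ^ 3 := by
        have h1 : k.toNat = (k - 1).toNat + 1 := by omega
        rw [h1, cubeSum]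
        have h3 : (((k - 1).toNat : Int) + 1) = k := by omega
        rw [h3]
      rw [hprev, hstep, hT]; ring

-- B's closed form for rs equals A's restSum of smallerCube, under the k invariant
lemma rs_eq (l k : Int) (hk : 0 ≤ k) (hinv : k = 0 ∨ k ^ 3 < l) :
    restSum (smallerCube l)
      = bumpB (l - k).toNat l k * l
        - (PySem.Int.floordiv (bumpB (l - k).toNat l k * (bumpB (l - k).toNat l k + 1)) 2) ^ 2 := by
  have h1 : restSum (smallerCube l) = sumFrom (l - 1).toNat l 1 := by
    unfold smallerCube restSum
    rw [restSum_eq_sum, zero_add, scLoop_sum l (l - 1).toNat 1 (by omega) (by omega)]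
  have h2 := sumFrom_prefix l k.toNat k (by omega) hinv
  have hfuel : sumFrom (l - (k + 1)).toNat l (k + 1) = sumFrom (l - k).toNat l (k + 1) :=
    sumFrom_fuel l _ _ (k + 1) (by omega) (by omega) (by omega)
  have h3 := bump_key l (l - k).toNat k hk
  set K := bumpB (l - k).toNat l k with hK
  have hKnn : 0 ≤ K := bumpB_nonneg (l - k).toNat l k hk
  have hcast : K * (K + 1) = ((K.toNat * (K.toNat + 1) : Nat) : Int) := by
    push_cast
    rw [Int.toNat_of_nonneg hKnn]
  have hfd2 : PySem.Int.floordiv ((K.toNat * (K.toNat + 1) : Nat) : Int) 2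
      = ((K.toNat * (K.toNat + 1) / 2 : Nat) : Int) := by
    exact_mod_cast PySem.Int.floordiv_natCast (K.toNat * (K.toNat + 1)) 2
  rw [h1, h2, hfuel, h3, hcast, hfd2, ← cubeSum_formula]

lemma loops_eq (h_ : Int) : ∀ (n : Nat) (l k : Int) (res : List (Int × Int)),
    (h_ - l).toNat = n → 0 ≤ k → (k = 0 ∨ k ^ 3 < l) →
    sarsLoopA n l h_ res = sarsLoopB n l h_ k res := by
  intro n
  induction n with
  | zero => intro l k res _ _ _; rw [sarsLoopA, sarsLoopB]
  | succ m ih =>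
      intro l k res hn hk hinv
      rw [sarsLoopA, sarsLoopB]
      show sarsLoopA m (l + 1) h_
            (if PySem.Int.mod (restSum (smallerCube l)) 3 = 0
              then res ++ [(l, restSum (smallerCube l))] else res)
          = sarsLoopB m (l + 1) h_ (bumpB (l - k).toNat l k)
            (if PySem.Int.mod (bumpB (l - k).toNat l k * l
                - (PySem.Int.floordiv (bumpB (l - k).toNat l k * (bumpB (l - k).toNat l k + 1)) 2) ^ 2) 3 = 0
              then res ++ [(l, bumpB (l - k).toNat l k * l
                - (PySem.Int.floordiv (bumpB (l - k).toNat l k * (bumpB (l - k).toNat l k + 1)) 2) ^ 2)] else res)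
      rw [rs_eq l k hk hinv]
      apply ih (l + 1) (bumpB (l - k).toNat l k) _ (by omega) (bumpB_nonneg _ l k hk)
      rcases bumpB_inv (l - k).toNat l k hinv with h | h
      · exact Or.inl h
      · exact Or.inr (by omega)

-- ===== VERDICT (by name: the statement is the Claim_ definition above) =====
theorem showAllRestSum_spec : Claim_equal_showAllRestSum := by
  intro l h_ _
  unfold Spec_showAllRestSum showAllRestSum showAllRestSum_alt
  exact loops_eq h_ (h_ - l).toNat l 0 [] rfl (by omega) (Or.inl rfl)
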